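-- pv_equiv track=rewrite | github.com/yashvardhancn44/nike-practice | 01otherQuestions/00-easy-to-medium-list/Arrays/findingDuplicatesAndUniqueElements.py | uSorting
-- ===== SOURCE A (Python) =====
-- def uSorting(arr):
--   arr.sort()
--   duplicates = set()
--   for i in range(len(arr)-1):
--     if arr[i]==arr[i+1]:
--       duplicates.add(arr[i])
--   uniqueElems = [ x for x in arr if x not in duplicates]
--   return duplicates, uniqueElems
-- ===== SOURCE B (Python) =====
-- def uSorting(arr):
--   arr.sort()
--   counts = {}
--   for x in arr:
--     counts[x] = counts.get(x, 0) + 1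
--   duplicates = {v for v, c in counts.items() if c > 1}
--   uniqueElems = [x for x in arr if counts[x] == 1]
--   return duplicates, uniqueElems
-- ===== Notes on version B (the rewrite author's own statement) =====
-- stated objective: alternative
-- what changed: Replaces A's adjacent-pair scan over the sorted list by a frequency table built in one pass: duplicates are the values with count > 1 and uniques the values with count == 1, so correctness no longer depends on equal elements being adjacent.
import Mathlib
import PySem

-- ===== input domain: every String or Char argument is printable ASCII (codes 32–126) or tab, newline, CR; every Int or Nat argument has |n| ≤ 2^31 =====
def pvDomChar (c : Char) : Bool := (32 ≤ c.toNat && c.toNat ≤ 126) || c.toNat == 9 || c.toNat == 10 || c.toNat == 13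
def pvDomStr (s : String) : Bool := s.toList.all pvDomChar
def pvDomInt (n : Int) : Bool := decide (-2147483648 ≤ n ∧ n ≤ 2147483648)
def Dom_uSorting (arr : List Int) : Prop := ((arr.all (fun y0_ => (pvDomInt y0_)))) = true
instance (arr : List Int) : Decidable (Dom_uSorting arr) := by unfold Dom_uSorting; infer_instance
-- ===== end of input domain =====

-- B replaces A's adjacent-pair scan on the sorted list by a one-pass frequency table (count > 1 = duplicate,
-- count == 1 = unique). Both Pythons sort arr in place; the equivalence proved here is about the RETURN value.

-- ===== PORT A =====
-- A sorts, then adds arr[i] to a set whenever arr[i] == arr[i+1], then keeps the elements not in that set.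
-- The loop indices i and i+1 (i in range(len(arr)-1)) are always in range, so pyGetD is exactly Python's arr[i].
def uSorting (arr : List Int) : List Int × List Int :=
  let s := PySem.List.sorted arr (fun x => x) false
  let duplicates : PySem.Set Int :=
    (PySem.List.pyRange 0 ((s.length : Int) - 1) 1).foldl
      (fun d i =>
        if PySem.List.pyGetD s i 0 == PySem.List.pyGetD s (i + 1) 0 then
          PySem.Set.add d (PySem.List.pyGetD s i 0)
        else d)
      PySem.Set.empty
  let uniqueElems := s.filter (fun x => !(PySem.Set.contains duplicates x))
  (duplicates, uniqueElems)

-- ===== PORT B =====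
-- B builds counts = {x: multiplicity} in one pass over the sorted list, takes {v : counts[v] > 1} as the
-- duplicate set and the x with counts[x] == 1 (in sorted order) as the uniques.
-- Every x of the sorted list is a key of counts, so getD is exactly Python's counts[x].
def uSorting_alt (arr : List Int) : List Int × List Int :=
  let s := PySem.List.sorted arr (fun x => x) false
  let counts : PySem.Dict Int Int := s.foldl (fun d x => d.modify x 0 (· + 1)) PySem.Dict.empty
  let duplicates : PySem.Set Int :=
    PySem.Set.ofList ((counts.items.filter (fun p => decide (1 < p.2))).map (fun p => p.1))
  let uniqueElems := s.filter (fun x => counts.getD x 0 == 1)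
  (duplicates, uniqueElems)

-- ===== PRECONDITION & SPEC =====
def Spec_uSorting (arr : List Int) (out : List Int × List Int) : Prop := out = uSorting_alt arr
instance (arr : List Int) (out : List Int × List Int) : Decidable (Spec_uSorting arr out) := by unfold Spec_uSorting; infer_instance

-- ===== CLAIM (what is proved, stated in full; the proofs are below) =====
def Claim_equal_uSorting : Prop := ∀ (arr : List Int), Dom_uSorting arr → Spec_uSorting arr (uSorting arr)

-- ===== LEMMAS AND PROOFS =====

-- structural form of A's index loop: scan adjacent pairs, adding the left one on equality
def adjDups : List Int → PySem.Set Int → PySem.Set Int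
  | a :: b :: t, d => adjDups (b :: t) (if a == b then PySem.Set.add d a else d)
  | _, d => d

-- the duplicate set both algorithms compute, as a list
def dupSet (s : List Int) : List Int :=
  (PySem.Set.ofList s).filter (fun k => decide (1 < s.count k))

lemma discard_of_not_mem (s : List Int) (a : Int) (h : a ∉ s) : PySem.Set.discard s a = s := by
  simp only [PySem.Set.discard]
  exact List.filter_eq_self.mpr (by intro x hx; simp; rintro rfl; exact h hx)

lemma discard_cons_self (X : List Int) (a : Int) :
    PySem.Set.discard (a :: X) a = PySem.Set.discard X a := by
  simp [PySem.Set.discard]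

lemma discard_idem (X : List Int) (a : Int) :
    PySem.Set.discard (PySem.Set.discard X a) a = PySem.Set.discard X a := by
  simp [PySem.Set.discard, List.filter_filter]

lemma ofList_cons_of_not_mem (a : Int) (l : List Int) (h : a ∉ l) :
    PySem.Set.ofList (a :: l) = a :: PySem.Set.ofList l := by
  rw [PySem.Set.ofList_cons, discard_of_not_mem]
  rw [PySem.Set.mem_ofList]; exact h

lemma dupSet_cons_of_not_mem (a : Int) (l : List Int) (h : a ∉ l) :
    dupSet (a :: l) = dupSet l := by
  unfold dupSet
  rw [ofList_cons_of_not_mem a l h, List.filter_cons]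
  have hca : (a :: l).count a = 1 := by simp [List.count_eq_zero.mpr h]
  simp only [hca]
  norm_num
  apply List.filter_congr
  intro x hx
  have hxl : x ∈ l := (PySem.Set.mem_ofList l x).mp hx
  have hxa : a ≠ x := fun e => h (e ▸ hxl)
  simp [hxa]

lemma add_add_self (d : PySem.Set Int) (a : Int) :
    PySem.Set.add (PySem.Set.add d a) a = PySem.Set.add d a := by
  apply PySem.Set.add_of_mem
  rw [PySem.Set.mem_add]
  right; rfl

lemma dupSet_cons_cons_self (a : Int) (t : List Int) :
    dupSet (a :: a :: t) =
      a :: (PySem.Set.discard (PySem.Set.ofList t) a).filter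
            (fun k => decide (1 < (a :: t).count k)) := by
  unfold dupSet
  rw [PySem.Set.ofList_cons, PySem.Set.ofList_cons, discard_cons_self, discard_idem]
  rw [List.filter_cons]
  have hca : 1 < (a :: a :: t).count a := by simp
  simp only [hca, decide_true, if_pos]
  congr 1
  apply List.filter_congr
  intro x hx
  have hxa : a ≠ x := by
    have := (PySem.Set.mem_discard (PySem.Set.ofList t) a x).mp hx
    exact fun e => this.2 e.symm
  simp [hxa]

lemma dupSet_cons_self (a : Int) (t : List Int) :
    dupSet (a :: t) =
      (a :: PySem.Set.discard (PySem.Set.ofList t) a).filter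
        (fun k => decide (1 < (a :: t).count k)) := by
  unfold dupSet
  rw [PySem.Set.ofList_cons]

lemma adjDups_sorted (s : List Int) (hs : s.Pairwise (· ≤ ·)) (d : PySem.Set Int) :
    adjDups s d = PySem.Set.update d (dupSet s) := by
  induction s generalizing d with
  | nil => simp [adjDups, dupSet, PySem.Set.ofList_nil, PySem.Set.update_nil]
  | cons a rest ih =>
    cases rest with
    | nil =>
      simp [adjDups, dupSet, PySem.Set.ofList_cons, PySem.Set.ofList_nil, PySem.Set.discard,
        PySem.Set.update_nil]
    | cons b t =>
      have hab : a ≤ b := (List.pairwise_cons.mp hs).1 b (by simp)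
      have hrest : (b :: t).Pairwise (· ≤ ·) := (List.pairwise_cons.mp hs).2
      rw [adjDups]
      by_cases he : a = b
      · subst he
        simp only [beq_self_eq_true, if_pos]
        rw [ih hrest]
        rw [dupSet_cons_cons_self, dupSet_cons_self, PySem.Set.update_cons]
        rw [List.filter_cons]
        by_cases hp : 1 < (a :: t).count a
        · simp only [hp, decide_true, if_pos, PySem.Set.update_cons, add_add_self]
        · simp only [hp, decide_false]
          simp
      · have hnotmem : a ∉ b :: t := by
          intro hmem
          have hba : b ≤ a := by
            rcases List.mem_cons.mp hmem with rfl | hat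
            · exact le_refl _
            · exact (List.pairwise_cons.mp hrest).1 a hat
          exact he (le_antisymm hab hba)
        simp only [beq_iff_eq, he, if_false]
        rw [ih hrest d, dupSet_cons_of_not_mem a (b :: t) hnotmem]

lemma natFold_eq_adjDups (s : List Int) (d : PySem.Set Int) :
    (List.range (s.length - 1)).foldl
      (fun d k => if s.getD k 0 == s.getD (k + 1) 0 then PySem.Set.add d (s.getD k 0) else d) d
    = adjDups s d := by
  induction s generalizing d with
  | nil => simp [adjDups]
  | cons a rest ih =>
    cases rest with
    | nil => simp [adjDups]
    | cons b t =>
      have hlen : (a :: b :: t).length - 1 = (b :: t).length - 1 + 1 := by simp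
      rw [hlen, List.range_succ_eq_map]
      simp only [List.foldl_cons, List.foldl_map, List.getD_cons_zero, List.getD_cons_succ]
      rw [adjDups]
      exact ih _

lemma idxFold_eq_adjDups (s : List Int) (d : PySem.Set Int) :
    (PySem.List.pyRange 0 ((s.length : Int) - 1) 1).foldl
      (fun d i =>
        if PySem.List.pyGetD s i 0 == PySem.List.pyGetD s (i + 1) 0 then
          PySem.Set.add d (PySem.List.pyGetD s i 0)
        else d) d
    = adjDups s d := by
  cases s with
  | nil => simp [adjDups, PySem.List.pyRange]
  | cons a rest =>
    have h1 : ((a :: rest).length : Int) - 1 = (rest.length : Nat) := by simp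
    rw [h1, PySem.List.pyRange_zero_natCast, List.foldl_map]
    have h2 : ∀ (d : PySem.Set Int) (k : Nat),
        (if PySem.List.pyGetD (a :: rest) (k : Int) 0 == PySem.List.pyGetD (a :: rest) ((k : Int) + 1) 0 then
          PySem.Set.add d (PySem.List.pyGetD (a :: rest) (k : Int) 0) else d)
        = (if (a :: rest).getD k 0 == (a :: rest).getD (k + 1) 0 then
            PySem.Set.add d ((a :: rest).getD k 0) else d) := by
      intro d k
      have : ((k : Int) + 1) = ((k + 1 : Nat) : Int) := by push_cast; ring
      rw [this, PySem.List.pyGetD_natCast, PySem.List.pyGetD_natCast]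
    simp only [h2]
    have h3 : rest.length = (a :: rest).length - 1 := by simp
    rw [h3]
    exact natFold_eq_adjDups _ d

lemma dupsB_eq_dupSet (s : List Int) :
    PySem.Set.ofList
      (((PySem.Dict.counter s).items.filter (fun p => decide (1 < p.2))).map (fun p => p.1))
    = dupSet s := by
  rw [PySem.Dict.items_counter, List.filter_map, List.map_map]
  have h1 : ((fun (p : Int × Int) => decide (1 < p.2)) ∘ fun k => (k, (s.count k : Int)))
      = fun k => decide (1 < s.count k) := by
    funext k; simp
  have h2 : ((fun (p : Int × Int) => p.1) ∘ fun k => (k, (s.count k : Int))) = id := by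
    funext k; rfl
  rw [h1, h2, List.map_id]
  apply PySem.Set.ofList_eq_self_of_nodup
  exact (PySem.Set.nodup_ofList s).filter _

-- unique list equality for sorted s (uses only counts)
lemma unique_eq (s : List Int) :
    s.filter (fun x => !(PySem.Set.contains (dupSet s) x))
    = s.filter (fun x => (PySem.Dict.counter s).getD x 0 == 1) := by
  apply List.filter_congr
  intro x hx
  rw [PySem.Dict.getD_counter]
  have hmem : PySem.Set.contains (dupSet s) x = decide (1 < s.count x) := by
    by_cases h : 1 < s.count x
    · simp [h]
      unfold dupSet
      rw [List.mem_filter]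
      exact ⟨(PySem.Set.mem_ofList s x).mpr hx, by simp [h]⟩
    · simp only [h, decide_false]
      rw [Bool.eq_false_iff]
      intro hc
      rw [PySem.Set.contains_iff] at hc
      unfold dupSet at hc
      rw [List.mem_filter] at hc
      simp at hc
      exact absurd hc.2 h
  rw [hmem]
  have hpos : 1 ≤ s.count x := List.count_pos_iff.mpr hx
  by_cases h : 1 < s.count x
  · simp [h]; omega
  · have h1 : s.count x = 1 := by omega
    simp [h1]

-- ===== VERDICT (by name: the statement is the Claim_ definition above) =====
theorem uSorting_spec : Claim_equal_uSorting := by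
  intro arr _
  unfold Spec_uSorting uSorting uSorting_alt
  have hs : (PySem.List.sorted arr (fun x => x) false).Pairwise (· ≤ ·) :=
    PySem.List.sorted_pairwise arr (fun x => x)
  set s := PySem.List.sorted arr (fun x => x) false
  have hnodup : (dupSet s).Nodup := (PySem.Set.nodup_ofList s).filter _
  have hA : (PySem.List.pyRange 0 ((s.length : Int) - 1) 1).foldl
      (fun d i =>
        if PySem.List.pyGetD s i 0 == PySem.List.pyGetD s (i + 1) 0 then
          PySem.Set.add d (PySem.List.pyGetD s i 0)
        else d) PySem.Set.empty = dupSet s := by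
    rw [idxFold_eq_adjDups, adjDups_sorted s hs]
    show PySem.Set.update [] (dupSet s) = dupSet s
    rw [PySem.Set.update_nil_left]
    exact PySem.Set.ofList_eq_self_of_nodup _ hnodup
  simp only [hA, unique_eq]
  show (dupSet s, List.filter (fun x => (PySem.Dict.counter s).getD x 0 == 1) s)
      = (PySem.Set.ofList
          (((PySem.Dict.counter s).items.filter (fun p => decide (1 < p.2))).map (fun p => p.1)),
         List.filter (fun x => (PySem.Dict.counter s).getD x 0 == 1) s)
  rw [dupsB_eq_dupSet]
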